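-- pv_equiv track=rewrite | github.com/Jeremy-Vidaurri/aoc_24 | 2024/9/solution.py | update_block
-- ===== SOURCE A (Python) =====
-- def get_space_length(disk_map, start):
--     for i in range(start, len(disk_map)):
--         if disk_map[i] != '.':
--             return i - start
--     # Went through the whole list and it's all the same at this point
--     return len(disk_map) - start
--
-- def update_block(disk_map, size, end):
--     start = 0
--     while start <= end - size:
--         if disk_map[start] == ".":
--             length = get_space_length(disk_map, start)
--             if length >= size:
--                 for i in range(start, start+size):
--                     disk_map[i] = disk_map[end]
--
--                 for i in range(end, end-size, -1):
--                     disk_map[i] = '.'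
--                 return disk_map
--
--         start += 1
--     return disk_map
-- ===== SOURCE B (Python) =====
-- def update_block(disk_map, size, end):
--     # Single forward pass: track the length of the current run of free cells;
--     # act at the first run whose start is <= end - size once it reaches `size` cells.
--     limit = end - size
--     run = 0
--     for i in range(len(disk_map)):
--         if disk_map[i] == '.':
--             run += 1
--             start = i - run + 1
--             if run >= size and start <= limit:
--                 for j in range(start, start + size):
--                     disk_map[j] = disk_map[end]
--                 for j in range(end, end - size, -1):
--                     disk_map[j] = '.'
--                 return disk_map
--         else:
--             run = 0
--     return disk_map
-- ===== Notes on version B (the rewrite author's own statement) =====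
-- stated objective: alternative
-- what changed: A rescans the free run from every candidate start position (get_space_length per '.'-cell); B makes one forward pass that maintains the length of the current run of '.' cells and performs the move at the first run whose start qualifies.
-- crash fix: When disk_map contains no run of max(size,1) consecutive '.' cells and len(disk_map) <= end - size, A's start scan runs past the end of the list and raises IndexError, while B finishes its single pass and returns the list unchanged. — e.g. on update_block(["a"], 2, 3): A raises IndexError, B returns ["a"]
import Mathlib
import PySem

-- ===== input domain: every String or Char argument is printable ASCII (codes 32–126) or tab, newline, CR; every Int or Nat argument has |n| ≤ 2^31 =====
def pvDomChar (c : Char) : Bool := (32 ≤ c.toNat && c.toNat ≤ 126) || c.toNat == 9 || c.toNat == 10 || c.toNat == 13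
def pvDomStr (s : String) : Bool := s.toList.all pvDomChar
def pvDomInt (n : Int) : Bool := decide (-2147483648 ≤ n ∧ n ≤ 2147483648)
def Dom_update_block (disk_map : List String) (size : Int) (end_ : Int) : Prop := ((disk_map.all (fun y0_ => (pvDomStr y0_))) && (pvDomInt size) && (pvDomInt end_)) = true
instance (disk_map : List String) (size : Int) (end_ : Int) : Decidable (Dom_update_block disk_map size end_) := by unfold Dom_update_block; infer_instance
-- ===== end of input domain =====

-- B replaces A's per-position rescans of the free run by a single forward pass that
-- maintains the current free-run length (objective: alternative algorithm, same measured
-- cost on random inputs). Both A and B mutate the list in place in Python in the identical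
-- way; the equivalence proved here is about the returned value (the mutated list).

-- ===== PORT A =====
-- for i in range(start, len(disk_map)): first i with disk_map[i] != '.' → i - start
def get_space_length_go (disk_map : List String) (start : Int) (i : Int) : Int :=
  if _h : i < (disk_map.length : Int) then
    if PySem.List.pyGetD disk_map i "" ≠ "." then i - start
    else get_space_length_go disk_map start (i + 1)
  else (disk_map.length : Int) - start
termination_by ((disk_map.length : Int) - i).toNat
decreasing_by simp_wf; omega

def get_space_length (disk_map : List String) (start : Int) : Int :=
  get_space_length_go disk_map start start

-- the two assignment loops both sources share verbatim:
--   for i in range(start, start+size): disk_map[i] = disk_map[end]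
--   for i in range(end, end-size, -1): disk_map[i] = '.'
def pvMoveBlock (disk_map : List String) (size : Int) (end_ : Int) (start : Int) : List String :=
  let d1 := (PySem.List.pyRange start (start + size) 1).foldl
    (fun d i => PySem.List.pySetD d i (PySem.List.pyGetD d end_ "")) disk_map
  (PySem.List.pyRange end_ (end_ - size) (-1)).foldl
    (fun d i => PySem.List.pySetD d i ".") d1

-- while start <= end - size: …
def update_block_go (disk_map : List String) (size : Int) (end_ : Int) (start : Int) : List String :=
  if _h : start ≤ end_ - size then
    if PySem.List.pyGetD disk_map start "" = "." then
      if size ≤ get_space_length disk_map start then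
        pvMoveBlock disk_map size end_ start
      else update_block_go disk_map size end_ (start + 1)
    else update_block_go disk_map size end_ (start + 1)
  else disk_map
termination_by (end_ - size + 1 - start).toNat
decreasing_by all_goals simp_wf; omega

def update_block (disk_map : List String) (size : Int) (end_ : Int) : List String :=
  update_block_go disk_map size end_ 0

-- ===== PORT B =====
-- single pass: `rest` is the not-yet-visited suffix, `i` the current index, `run`
-- the length of the run of '.' cells ending just before index i
def update_block_alt_go (disk_map : List String) (size : Int) (end_ : Int)
    (rest : List String) (i : Int) (run : Int) : List String :=
  match rest with
  | [] => disk_map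
  | c :: rest' =>
    if c = "." then
      let run' := run + 1
      let start := i - run' + 1
      if size ≤ run' ∧ start ≤ end_ - size then
        pvMoveBlock disk_map size end_ start
      else update_block_alt_go disk_map size end_ rest' (i + 1) run'
    else update_block_alt_go disk_map size end_ rest' (i + 1) 0

def update_block_alt (disk_map : List String) (size : Int) (end_ : Int) : List String :=
  update_block_alt_go disk_map size end_ disk_map 0 0

-- ===== PRECONDITION & SPEC =====
-- length of the leading run of "." cells (used by Raises_ below and by the proofs)
def dotRun (l : List String) : Nat := (l.takeWhile (fun c => c == ".")).length

-- Pre_ is exactly the set of inputs on which Python A returns normally (no IndexError):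
-- either the while loop is vacuous, or a qualifying free run exists (a "." cell at
-- p ≤ end_-size heading a run of ≥ size dots) and the move's disk_map[end_] access is in
-- range (or vacuous, size ≤ 0), or no qualifying run exists and the start scan stops
-- before running off the end of the list.
def Pre_update_block (disk_map : List String) (size : Int) (end_ : Int) : Prop :=
  end_ < size ∨
    ((∃ p < disk_map.length, (p : Int) ≤ end_ - size ∧ disk_map.getD p "" = "." ∧
        size ≤ (dotRun (disk_map.drop p) : Int)) ∧
      (size ≤ 0 ∨ end_ < (disk_map.length : Int))) ∨
    (¬ (∃ p < disk_map.length, (p : Int) ≤ end_ - size ∧ disk_map.getD p "" = "." ∧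
        size ≤ (dotRun (disk_map.drop p) : Int)) ∧
      end_ - size < (disk_map.length : Int))
instance (disk_map : List String) (size : Int) (end_ : Int) : Decidable (Pre_update_block disk_map size end_) := by unfold Pre_update_block; infer_instance

def pvWitness_update_block : List String × Int × Int := (["a", ".", ".", "b", "."], 2, 3)

-- When disk_map has no run of max(size,1) consecutive "." cells and its length is at most
-- end_ - size, A's start scan runs past the end of the list and raises IndexError, while B
-- finishes its single pass and returns the list unchanged.
def Raises_update_block (disk_map : List String) (size : Int) (end_ : Int) : Prop :=
  (disk_map.length : Int) ≤ end_ - size ∧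
    ∀ i : Nat, i < disk_map.length → (dotRun (disk_map.drop i) : Int) < max size 1
instance (disk_map : List String) (size : Int) (end_ : Int) : Decidable (Raises_update_block disk_map size end_) := by unfold Raises_update_block; infer_instance

def pvRaiseWitness_update_block : List String × Int × Int := (["a"], 2, 3)
def pvRaiseWitnessOut_update_block : List String := ["a"]

def Spec_update_block (disk_map : List String) (size : Int) (end_ : Int) (out : List String) : Prop := out = update_block_alt disk_map size end_
instance (disk_map : List String) (size : Int) (end_ : Int) (out : List String) : Decidable (Spec_update_block disk_map size end_ out) := by unfold Spec_update_block; infer_instance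

-- ===== CLAIM (what is proved, stated in full; the proofs are below) =====
def Claim_equal_update_block : Prop := ∀ (disk_map : List String) (size : Int) (end_ : Int), Dom_update_block disk_map size end_ → Pre_update_block disk_map size end_ → Spec_update_block disk_map size end_ (update_block disk_map size end_)
def Claim_raises_update_block : Prop := (∀ (disk_map : List String) (size : Int) (end_ : Int), Dom_update_block disk_map size end_ → Raises_update_block disk_map size end_ → ¬ Pre_update_block disk_map size end_) ∧ (Dom_update_block (pvRaiseWitness_update_block.1) (pvRaiseWitness_update_block.2.1) (pvRaiseWitness_update_block.2.2) ∧ Raises_update_block (pvRaiseWitness_update_block.1) (pvRaiseWitness_update_block.2.1) (pvRaiseWitness_update_block.2.2) ∧ update_block_alt (pvRaiseWitness_update_block.1) (pvRaiseWitness_update_block.2.1) (pvRaiseWitness_update_block.2.2) = pvRaiseWitnessOut_update_block)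

-- ===== LEMMAS AND PROOFS =====

theorem dotRun_nil : dotRun [] = 0 := rfl

theorem dotRun_cons (x : String) (t : List String) :
    dotRun (x :: t) = if x == "." then dotRun t + 1 else 0 := by
  unfold dotRun
  by_cases h : x == "." <;> simp [h]

theorem dotRun_le_length (l : List String) : dotRun l ≤ l.length := by
  unfold dotRun; exact (List.takeWhile_sublist _).length_le

theorem dotRun_ge (l : List String) (m : Nat) (hm : m ≤ l.length)
    (h : ∀ k < m, l.getD k "" = ".") : m ≤ dotRun l := by
  induction l generalizing m with
  | nil => simp at hm; omega
  | cons x t ih =>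
    cases m with
    | zero => omega
    | succ m =>
      have hx : x = "." := h 0 (by omega)
      rw [dotRun_cons]
      simp [hx]
      have := ih m (by simpa using hm) (fun k hk => h (k + 1) (by omega))
      omega

theorem dotRun_le (l : List String) (m : Nat) (h : l.getD m "" ≠ ".") :
    dotRun l ≤ m := by
  induction l generalizing m with
  | nil => simp [dotRun_nil]
  | cons x t ih =>
    cases m with
    | zero =>
      simp at h
      rw [dotRun_cons]
      simp [h]
    | succ m =>
      rw [dotRun_cons]
      by_cases hx : x == "." <;> simp [hx]
      have := ih m (by simpa using h)
      omega

-- get_space_length computes the leading dot run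
theorem gsl_go_eq (disk : List String) (s : Int) (i : Nat) (hi : i ≤ disk.length) :
    get_space_length_go disk s (i : Int) = (i : Int) - s + (dotRun (disk.drop i) : Int) := by
  induction hn : disk.length - i generalizing i with
  | zero =>
    have : i = disk.length := by omega
    subst this
    rw [get_space_length_go]
    simp [dotRun_nil]
  | succ n ih =>
    have hlt : i < disk.length := by omega
    have hdrop : disk.drop i = disk[i] :: disk.drop (i + 1) :=
      (List.drop_eq_getElem_cons hlt)
    rw [get_space_length_go]
    have hget : PySem.List.pyGetD disk (i : Int) "" = disk[i] := by
      simp [PySem.List.pyGetD_natCast, List.getD_eq_getElem?_getD, hlt]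
    rw [dif_pos (by exact_mod_cast hlt)]
    rw [hget]
    by_cases hdot : disk[i] = "."
    · rw [if_neg (by simp [hdot])]
      have : ((i : Int) + 1) = ((i + 1 : Nat) : Int) := by push_cast; ring
      rw [this, ih (i + 1) (by omega) (by omega)]
      rw [hdrop, dotRun_cons]
      simp [hdot]
      ring
    · rw [if_pos (by simp [hdot])]
      rw [hdrop, dotRun_cons]
      simp [hdot]

theorem gsl_eq (disk : List String) (s : Nat) (hs : s ≤ disk.length) :
    get_space_length disk (s : Int) = (dotRun (disk.drop s) : Int) := by
  unfold get_space_length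
  rw [gsl_go_eq disk (s : Int) s hs]
  ring

-- the qualification predicate A searches for and B detects in one pass
def qualB (disk : List String) (limit : Int) (size : Int) (p : Nat) : Bool :=
  (disk.getD p "" == ".") && decide ((p : Int) ≤ limit) &&
    decide (size ≤ (dotRun (disk.drop p) : Int))

def firstQ (disk : List String) (limit : Int) (size : Int) (s : Nat) : Option Nat :=
  (List.range' s (disk.length - s)).find? (qualB disk limit size)

theorem qualB_iff (disk : List String) (limit size : Int) (p : Nat) :
    qualB disk limit size p = true ↔
      (disk.getD p "" = "." ∧ (p : Int) ≤ limit ∧ size ≤ (dotRun (disk.drop p) : Int)) := by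
  unfold qualB
  simp only [Bool.and_eq_true, beq_iff_eq, decide_eq_true_eq, and_assoc]

theorem qualB_false (disk : List String) (limit size : Int) (p : Nat)
    (h : ¬ (disk.getD p "" = "." ∧ (p : Int) ≤ limit ∧ size ≤ (dotRun (disk.drop p) : Int))) :
    qualB disk limit size p = false := by
  rw [← Bool.not_eq_true, qualB_iff]; exact h

theorem firstQ_none_of_ge (disk : List String) (limit size : Int) (s : Nat)
    (hs : limit < (s : Int)) : firstQ disk limit size s = none := by
  unfold firstQ
  apply List.find?_eq_none.mpr
  intro p hp
  have hsp : s ≤ p := (List.mem_range'_1.mp hp).1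
  simp only [Bool.not_eq_true]
  apply qualB_false
  rintro ⟨-, h2, -⟩
  omega

theorem firstQ_cons (disk : List String) (limit size : Int) (s : Nat)
    (hs : s < disk.length) :
    firstQ disk limit size s =
      if qualB disk limit size s then some s else firstQ disk limit size (s + 1) := by
  unfold firstQ
  have : disk.length - s = (disk.length - (s + 1)) + 1 := by omega
  rw [this, List.range'_succ, List.find?_cons]
  by_cases h : qualB disk limit size s <;> simp [h]

-- A's scan returns the list unchanged once the index is past the end of the list
theorem goA_none (disk : List String) (size end_ : Int) :
    ∀ (k : Nat) (s : Nat), (end_ - size + 1 - (s : Int)).toNat ≤ k → disk.length ≤ s →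
      update_block_go disk size end_ (s : Int) = disk := by
  intro k
  induction k with
  | zero =>
    intro s hk hs
    rw [update_block_go, dif_neg (by omega)]
  | succ k ih =>
    intro s hk hs
    rw [update_block_go]
    by_cases hcond : (s : Int) ≤ end_ - size
    · rw [dif_pos hcond]
      have hget : PySem.List.pyGetD disk (s : Int) "" = disk.getD s "" := by
        simp [PySem.List.pyGetD_natCast]
      have hdot : disk.getD s "" = "" := List.getD_eq_default _ _ hs
      rw [hget, hdot, if_neg (by simp)]
      have hstep : ((s : Int) + 1) = ((s + 1 : Nat) : Int) := by push_cast; ring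
      rw [hstep, ih (s + 1) (by omega) (by omega)]
    · rw [dif_neg hcond]

-- characterisation of A's while loop
theorem lemA (disk : List String) (size end_ : Int) :
    ∀ (k : Nat) (s : Nat), (end_ - size + 1 - (s : Int)).toNat ≤ k →
      update_block_go disk size end_ (s : Int) =
        (match firstQ disk (end_ - size) size s with
         | some p => pvMoveBlock disk size end_ (p : Int)
         | none => disk) := by
  intro k
  induction k with
  | zero =>
    intro s hsk
    rw [firstQ_none_of_ge disk _ _ s (by omega)]
    rw [update_block_go, dif_neg (by omega)]
  | succ k ih =>
    intro s hsk
    by_cases hcond : (s : Int) ≤ end_ - size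
    · by_cases hsl : s < disk.length
      · rw [update_block_go, dif_pos hcond]
        have hget : PySem.List.pyGetD disk (s : Int) "" = disk.getD s "" := by
          simp [PySem.List.pyGetD_natCast]
        rw [hget, firstQ_cons disk _ _ s hsl]
        have hstep : ((s : Int) + 1) = ((s + 1 : Nat) : Int) := by push_cast; ring
        by_cases hdot : disk.getD s "" = "."
        · rw [if_pos hdot]
          rw [gsl_eq disk s (by omega)]
          by_cases hlen : size ≤ (dotRun (disk.drop s) : Int)
          · rw [if_pos hlen]
            rw [(qualB_iff disk (end_ - size) size s).mpr ⟨hdot, hcond, hlen⟩]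
            simp
          · rw [if_neg hlen]
            rw [qualB_false disk (end_ - size) size s (by tauto)]
            rw [hstep, ih (s + 1) (by omega)]
            simp
        · rw [if_neg hdot]
          rw [qualB_false disk (end_ - size) size s (by tauto)]
          rw [hstep, ih (s + 1) (by omega)]
          simp
      · rw [goA_none disk size end_ (k + 1) s hsk (by omega)]
        have hnone : firstQ disk (end_ - size) size s = none := by
          unfold firstQ
          rw [show disk.length - s = 0 from by omega]
          rfl
        rw [hnone]
    · rw [update_block_go, dif_neg hcond]
      rw [firstQ_none_of_ge disk _ _ s (by omega)]

theorem firstQ_skip (disk : List String) (limit size : Int) (s t : Nat)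
    (hst : s ≤ t) (ht : t ≤ disk.length)
    (h : ∀ p, s ≤ p → p < t → qualB disk limit size p = false) :
    firstQ disk limit size s = firstQ disk limit size t := by
  induction hn : t - s generalizing s with
  | zero =>
    have : s = t := by omega
    subst this; rfl
  | succ n ih =>
    have hs : s < t := by omega
    rw [firstQ_cons disk _ _ s (by omega), h s (by omega) hs]
    simp only [if_false, Bool.false_eq_true]
    exact ih (s + 1) (by omega) (fun p hp hpt => h p (by omega) hpt) (by omega)

-- characterisation of B's single pass
theorem lemB (disk : List String) (size end_ : Int) :
    ∀ (n : Nat) (i run : Nat), disk.length - i = n → run ≤ i → i ≤ disk.length →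
      (∀ k, i - run ≤ k → k < i → disk.getD k "" = ".") →
      (((i - run : Nat) : Int) ≤ end_ - size → ((run : Int) < size ∨ run = 0)) →
      update_block_alt_go disk size end_ (disk.drop i) (i : Int) (run : Int) =
        (match firstQ disk (end_ - size) size (i - run) with
         | some p => pvMoveBlock disk size end_ (p : Int)
         | none => disk) := by
  intro n
  induction n with
  | zero =>
    intro i run hn hri hil hdots hmax
    have hi : i = disk.length := by omega
    subst hi
    rw [List.drop_length]
    have hnone : firstQ disk (end_ - size) size (disk.length - run) = none := by
      unfold firstQ
      apply List.find?_eq_none.mpr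
      intro p hp
      have hp1 := List.mem_range'_1.mp hp
      have hps : disk.length - run ≤ p := hp1.1
      have hpl : p < disk.length := by omega
      simp only [Bool.not_eq_true]
      apply qualB_false
      rintro ⟨-, hlim, hrun⟩
      have h1 : dotRun (disk.drop p) ≤ disk.length - p := by
        have := dotRun_le_length (disk.drop p)
        simpa using this
      rcases hmax (by omega) with h2 | h2 <;> omega
    rw [hnone, update_block_alt_go]
  | succ n ih =>
    intro i run hn hri hil hdots hmax
    have hlt : i < disk.length := by omega
    have hdrop : disk.drop i = disk[i] :: disk.drop (i + 1) :=
      List.drop_eq_getElem_cons hlt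
    rw [hdrop]
    rw [update_block_alt_go]
    have hgetD : disk.getD i "" = disk[i] := by
      simp [List.getD_eq_getElem?_getD, hlt]
    have hstep : ((i : Int) + 1) = ((i + 1 : Nat) : Int) := by push_cast; ring
    by_cases hdot : disk[i] = "."
    · rw [if_pos hdot]
      have hsub : (i : Int) - ((run : Int) + 1) + 1 = ((i - run : Nat) : Int) := by
        push_cast [Nat.cast_sub hri]; ring
      by_cases htrig : size ≤ (run : Int) + 1 ∧ (i : Int) - ((run : Int) + 1) + 1 ≤ end_ - size
      · rw [if_pos htrig]
        have hs : i - run < disk.length := by omega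
        have hdots' : ∀ k < run + 1, (disk.drop (i - run)).getD k "" = "." := by
          intro k hk
          have hik : i - run + k < disk.length := by omega
          rw [List.getD_eq_getElem?_getD, List.getElem?_drop]
          by_cases hki : i - run + k = i
          · rw [hki, List.getElem?_eq_getElem hlt]
            simpa using hdot
          · have h2 := hdots (i - run + k) (by omega) (by omega)
            rw [List.getD_eq_getElem?_getD] at h2
            exact h2
        have hge : run + 1 ≤ dotRun (disk.drop (i - run)) :=
          dotRun_ge _ _ (by simp; omega) hdots'
        have hd0 : disk.getD (i - run) "" = "." := by
          have := hdots' 0 (by omega)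
          rwa [List.getD_eq_getElem?_getD, List.getElem?_drop, Nat.add_zero,
            ← List.getD_eq_getElem?_getD] at this
        have hq : qualB disk (end_ - size) size (i - run) = true :=
          (qualB_iff _ _ _ _).mpr
            ⟨hd0, by rw [← hsub]; exact htrig.2, by have := htrig.1; omega⟩
        rw [firstQ_cons disk _ _ (i - run) hs, hq]
        simp only [if_true]
        rw [hsub]
      · rw [if_neg htrig]
        have hrec := ih (i + 1) (run + 1) (by omega) (by omega) (by omega)
          (by
            intro k hk1 hk2
            by_cases hki : k = i
            · subst hki; rw [hgetD]; exact hdot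
            · exact hdots k (by omega) (by omega))
          (by
            intro hlim
            left
            have hsub2 : i + 1 - (run + 1) = i - run := by omega
            rw [hsub2] at hlim
            by_contra hcon
            exact htrig ⟨by omega, by rw [hsub]; exact_mod_cast hlim⟩)
        rw [hstep]
        have hruncast : ((run : Int) + 1) = ((run + 1 : Nat) : Int) := by push_cast; ring
        rw [hruncast, hrec]
        have hsub2 : i + 1 - (run + 1) = i - run := by omega
        rw [hsub2]
    · rw [if_neg hdot]
      have hskip : firstQ disk (end_ - size) size (i - run) =
          firstQ disk (end_ - size) size (i + 1) := by
        apply firstQ_skip disk _ _ (i - run) (i + 1) (by omega) (by omega)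
        intro p hp1 hp2
        apply qualB_false
        by_cases hpi : p = i
        · subst hpi
          rintro ⟨hc, -, -⟩
          rw [hgetD] at hc
          exact hdot hc
        · -- p is inside the dot run [i-run, i); the run ends at the non-dot cell i
          have hdle : dotRun (disk.drop p) ≤ i - p := by
            apply dotRun_le
            rw [List.getD_eq_getElem?_getD, List.getElem?_drop,
              show p + (i - p) = i from by omega, List.getElem?_eq_getElem hlt]
            simpa using hdot
          rintro ⟨-, hlim, hsz⟩
          have hsml : ((i - run : Nat) : Int) ≤ end_ - size := by
            have hcast : ((i - run : Nat) : Int) ≤ (p : Int) := by exact_mod_cast hp1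
            omega
          rcases hmax hsml with hrs | hr0 <;> omega
      rw [hskip]
      have hrec := ih (i + 1) 0 (by omega) (by omega) (by omega)
        (by intro k hk1 hk2; exact absurd hk2 (by omega))
        (by intro _; right; rfl)
      simp only [Nat.cast_zero, Nat.sub_zero] at hrec
      rw [hstep, hrec]

-- ===== VERDICT (by name: the statement is the Claim_ definition above) =====
theorem update_block_spec : Claim_equal_update_block := by
  intro disk size end_ _hDom _hPre
  unfold Spec_update_block update_block update_block_alt
  have hA := lemA disk size end_ (end_ - size + 1).toNat 0 (by omega)
  have hB := lemB disk size end_ disk.length 0 0 (by omega) (by omega) (by omega)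
    (by intro k hk1 hk2; omega) (by intro _; right; rfl)
  simp only [Nat.cast_zero] at hA hB
  rw [List.drop_zero] at hB
  rw [hA, hB]

theorem update_block_raises : Claim_raises_update_block := by
  unfold Claim_raises_update_block
  constructor
  · intro disk size end_ _hDom hR hPre
    rcases hR with ⟨h1, hrun⟩
    have hlen0 : (0 : Int) ≤ (disk.length : Int) := by positivity
    rcases hPre with h | ⟨⟨p, hp, _hplim, hpdot, hpd⟩, _⟩ | ⟨-, h3⟩
    · omega
    · have hdr := hrun p hp
      have hpos : 1 ≤ dotRun (disk.drop p) := by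
        apply dotRun_ge _ _ (by simp; omega)
        intro k hk
        interval_cases k
        rwa [List.getD_eq_getElem?_getD, List.getElem?_drop, Nat.add_zero,
          ← List.getD_eq_getElem?_getD]
      omega
    · omega
  · exact ⟨by decide, by decide, by decide⟩

-- self-check: the raises witness really lies outside Pre_update_block
theorem pvRaiseWitness_ok :
    ¬ Pre_update_block (pvRaiseWitness_update_block.1) (pvRaiseWitness_update_block.2.1)
      (pvRaiseWitness_update_block.2.2) :=
  update_block_raises.1 _ _ _ (by decide) update_block_raises.2.2.1
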